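-- pv_equiv track=rewrite | github.com/yelshall/arbitrage_opportunites | arbitrage_opportunites.py | eliminateSimilarCycles
-- ===== SOURCE A (Python) =====
-- import itertools
--
-- def eliminateSimilarCycles(possibleCycles):
-- 	tempCycles = []
-- 	for cycle in possibleCycles:
-- 		if cycle[0] == cycle[len(cycle) - 1]:
-- 			tempCycles.append(cycle)
-- 	tempCycles.sort()
-- 	actualCycles = list(tempCycles for tempCycles,_ in itertools.groupby(tempCycles))
--
-- 	return actualCycles
-- ===== SOURCE B (Python) =====
-- def eliminateSimilarCycles(possibleCycles):
-- 	seen = set()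
-- 	results = []
-- 	for cycle in possibleCycles:
-- 		if cycle[0] == cycle[-1]:
-- 			key = tuple(cycle)
-- 			if key not in seen:
-- 				seen.add(key)
-- 				results.append(cycle)
-- 	results.sort()
-- 	return results
-- ===== Notes on version B (the rewrite author's own statement) =====
-- stated objective: alternative
-- what changed: Replaces A's sort-everything-then-consecutive-dedup-via-itertools.groupby pipeline with a single filtering pass that deduplicates immediately through a hash set of seen tuples, sorting only the distinct closed cycles at the end.
import Mathlib
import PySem

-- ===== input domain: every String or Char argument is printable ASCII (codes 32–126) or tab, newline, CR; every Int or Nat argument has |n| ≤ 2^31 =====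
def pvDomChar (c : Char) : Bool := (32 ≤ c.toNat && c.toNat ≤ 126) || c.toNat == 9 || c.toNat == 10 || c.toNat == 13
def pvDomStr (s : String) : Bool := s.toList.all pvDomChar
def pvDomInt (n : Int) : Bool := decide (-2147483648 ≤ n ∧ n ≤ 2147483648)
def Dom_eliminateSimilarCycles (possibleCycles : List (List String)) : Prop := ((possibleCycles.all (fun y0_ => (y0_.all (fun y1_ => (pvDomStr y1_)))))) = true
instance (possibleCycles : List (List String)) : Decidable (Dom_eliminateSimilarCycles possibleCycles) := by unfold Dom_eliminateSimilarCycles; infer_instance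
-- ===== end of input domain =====

-- B replaces A's sort-then-consecutive-dedup (itertools.groupby) pipeline by a single
-- filter+hash-set-dedup pass followed by a sort of the distinct cycles (objective: alternative).

-- list.sort() on List (List String) (Python's lexicographic list comparison), shared by both
-- ports as the one library call both Pythons make
def pvSort (l : List (List String)) : List (List String) :=
  @PySem.List.sorted (List String) (List String)
    (@Preorder.toLT _ (@PartialOrder.toPreorder _ (@LinearOrder.toPartialOrder _
      (@List.instLinearOrder String String.instLinearOrder))))
    (@LinearOrder.toDecidableLT (List String) (@List.instLinearOrder String String.instLinearOrder))
    l (fun x => x) false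

-- ===== PORT A =====
-- key extraction of itertools.groupby: first element of each maximal run of equal elements
def pvGroupKeysAux (prev : List String) : List (List String) → List (List String)
  | [] => []
  | x :: xs => if x = prev then pvGroupKeysAux prev xs else x :: pvGroupKeysAux x xs

def pvGroupKeys : List (List String) → List (List String)
  | [] => []
  | x :: xs => x :: pvGroupKeysAux x xs

def eliminateSimilarCycles (possibleCycles : List (List String)) : List (List String) :=
  -- cycle[0] / cycle[len(cycle)-1] via pyGet?; Pre_ excludes the empty cycles where Python raises
  pvGroupKeys (pvSort (possibleCycles.foldl (fun acc cycle =>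
    if PySem.List.pyGet? cycle 0 = PySem.List.pyGet? cycle ((cycle.length : Int) - 1)
    then acc ++ [cycle] else acc) []))

-- ===== PORT B =====
def eliminateSimilarCycles_alt (possibleCycles : List (List String)) : List (List String) :=
  -- state = (seen : set of cycles, results); tuple(cycle) keys are the cycles themselves
  pvSort (possibleCycles.foldl
    (fun (st : PySem.Set (List String) × List (List String)) cycle =>
      if PySem.List.pyGet? cycle 0 = PySem.List.pyGet? cycle ((cycle.length : Int) - 1) then
        if PySem.Set.contains st.1 cycle then st
        else (PySem.Set.add st.1 cycle, st.2 ++ [cycle])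
      else st) (PySem.Set.empty, [])).2

-- ===== PRECONDITION & SPEC =====
-- Pre_ excludes inputs containing an empty cycle, on which Python's cycle[0] raises IndexError.
def Pre_eliminateSimilarCycles (possibleCycles : List (List String)) : Prop :=
  ∀ c ∈ possibleCycles, c ≠ []
instance (possibleCycles : List (List String)) : Decidable (Pre_eliminateSimilarCycles possibleCycles) := by unfold Pre_eliminateSimilarCycles; infer_instance

def pvWitness_eliminateSimilarCycles : List (List String) :=
  [["a", "a"], ["a", "b"], ["a", "a"], ["b"]]

def Spec_eliminateSimilarCycles (possibleCycles : List (List String)) (out : List (List String)) : Prop := out = eliminateSimilarCycles_alt possibleCycles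
instance (possibleCycles : List (List String)) (out : List (List String)) : Decidable (Spec_eliminateSimilarCycles possibleCycles out) := by unfold Spec_eliminateSimilarCycles; infer_instance

-- ===== CLAIM (what is proved, stated in full; the proofs are below) =====
def Claim_equal_eliminateSimilarCycles : Prop := ∀ (possibleCycles : List (List String)), Dom_eliminateSimilarCycles possibleCycles → Pre_eliminateSimilarCycles possibleCycles → Spec_eliminateSimilarCycles possibleCycles (eliminateSimilarCycles possibleCycles)

-- ===== LEMMAS AND PROOFS =====

-- membership through groupby's key list
theorem pvMemAux (xs : List (List String)) : ∀ (prev a : List String),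
    (a ∈ prev :: pvGroupKeysAux prev xs ↔ a ∈ prev :: xs) := by
  induction xs with
  | nil => intro prev a; rfl
  | cons x xs ih =>
    intro prev a
    by_cases hx : x = prev
    · subst hx
      simp only [pvGroupKeysAux]
      have h2 := ih x a
      simp only [List.mem_cons] at h2 ⊢
      tauto
    · simp only [pvGroupKeysAux, if_neg hx]
      have h2 := ih x a
      simp only [List.mem_cons] at h2 ⊢
      tauto

-- on a ≤-sorted tail, groupby's keys are strictly increasing
theorem pvPwAux (xs : List (List String)) : ∀ (prev : List String),
    (∀ y ∈ xs, prev ≤ y) → xs.Pairwise (· ≤ ·) →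
    (prev :: pvGroupKeysAux prev xs).Pairwise (· < ·) := by
  induction xs with
  | nil => intro prev _ _; simp [pvGroupKeysAux]
  | cons x xs ih =>
    intro prev hle hpw
    rcases List.pairwise_cons.mp hpw with ⟨hx, hxs⟩
    by_cases heq : x = prev
    · simp only [pvGroupKeysAux, if_pos heq]
      exact ih prev (fun y hy => hle y (List.mem_cons_of_mem _ hy)) hxs
    · simp only [pvGroupKeysAux, if_neg heq]
      have hplt : prev < x := lt_of_le_of_ne (hle x List.mem_cons_self) (fun h => heq h.symm)
      refine List.pairwise_cons.mpr ⟨?_, ih x hx hxs⟩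
      intro a ha
      rcases List.mem_cons.mp ((pvMemAux xs x a).mp ha) with h | h
      · exact h ▸ hplt
      · exact lt_of_lt_of_le hplt (hx a h)

-- sort-then-groupby equals sort-of-the-distinct-elements
theorem pvGroupKeys_of_sorted (F : List (List String)) :
    pvGroupKeys (pvSort F) = pvSort (PySem.Set.ofList F) := by
  have hs : (pvSort F).Pairwise (· ≤ ·) := PySem.List.sorted_pairwise F (fun x => x)
  have hmemS : ∀ a, a ∈ pvSort F ↔ a ∈ F := by
    intro a; unfold pvSort
    exact @PySem.List.mem_sorted (List String) (List String)
      (@Preorder.toLT _ (@PartialOrder.toPreorder _ (@LinearOrder.toPartialOrder _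
        (@List.instLinearOrder String String.instLinearOrder))))
      (@LinearOrder.toDecidableLT (List String) (@List.instLinearOrder String String.instLinearOrder))
      F (fun x => x) false a
  have hpw : (pvGroupKeys (pvSort F)).Pairwise (· < ·) := by
    cases h : pvSort F with
    | nil => simp [pvGroupKeys]
    | cons x t =>
      rcases List.pairwise_cons.mp (h ▸ hs) with ⟨hx, ht⟩
      exact pvPwAux t x hx ht
  have hmem : ∀ a, a ∈ pvGroupKeys (pvSort F) ↔ a ∈ F := by
    intro a
    cases h : pvSort F with
    | nil => simp only [pvGroupKeys]; rw [← hmemS a, h]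
    | cons x t => simp only [pvGroupKeys]; rw [pvMemAux t x a, ← hmemS a, h]
  have hperm : (pvGroupKeys (pvSort F)).Perm (PySem.Set.ofList F) := by
    refine (List.perm_ext_iff_of_nodup (hpw.imp ne_of_lt) (PySem.Set.nodup_ofList F)).mpr ?_
    intro a
    rw [hmem a, PySem.Set.mem_ofList]
  exact (PySem.List.sorted_eq_of_perm_of_pairwise_lt (PySem.Set.ofList F)
    (pvGroupKeys (pvSort F)) (fun x => x) hperm hpw).symm

-- B's loop keeps seen = results; both equal the running first-occurrence dedup of the kept cycles
theorem pvBfold (xs : List (List String)) : ∀ (s : PySem.Set (List String)),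
    xs.foldl
      (fun (st : PySem.Set (List String) × List (List String)) cycle =>
        if PySem.List.pyGet? cycle 0 = PySem.List.pyGet? cycle ((cycle.length : Int) - 1) then
          if PySem.Set.contains st.1 cycle then st
          else (PySem.Set.add st.1 cycle, st.2 ++ [cycle])
        else st) (s, s)
    = ((xs.filter (fun c => decide (PySem.List.pyGet? c 0 = PySem.List.pyGet? c ((c.length : Int) - 1)))).foldl PySem.Set.add s,
       (xs.filter (fun c => decide (PySem.List.pyGet? c 0 = PySem.List.pyGet? c ((c.length : Int) - 1)))).foldl PySem.Set.add s) := by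
  induction xs with
  | nil => intro s; simp
  | cons x xs ih =>
    intro s
    by_cases hc' : PySem.List.pyGet? x 0 = PySem.List.pyGet? x ((x.length : Int) - 1)
    · rw [List.filter_cons_of_pos (by simpa using hc')]
      simp only [List.foldl_cons, if_pos hc']
      by_cases hin : PySem.Set.contains s x
      · have hadd : PySem.Set.add s x = s := by simp only [PySem.Set.add, if_pos hin]
        rw [if_pos hin, hadd]
        exact ih s
      · have hadd : PySem.Set.add s x = s ++ [x] := by
          simp only [PySem.Set.add, if_neg hin]
        rw [if_neg hin, hadd]
        exact ih (s ++ [x])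
    · rw [List.filter_cons_of_neg (by simpa using hc')]
      simp only [List.foldl_cons, if_neg hc']
      exact ih s

-- ===== VERDICT (by name: the statement is the Claim_ definition above) =====
theorem eliminateSimilarCycles_spec : Claim_equal_eliminateSimilarCycles := by
  intro xs _ _
  unfold Spec_eliminateSimilarCycles eliminateSimilarCycles eliminateSimilarCycles_alt
  have hA := PySem.List.foldl_append_ite_eq_filter
    (fun c => PySem.List.pyGet? c 0 = PySem.List.pyGet? c ((c.length : Int) - 1)) xs []
  rw [hA]
  have hB := pvBfold xs []
  rw [show (PySem.Set.empty : PySem.Set (List String)) = ([] : List (List String)) from rfl, hB]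
  simp only [List.nil_append]
  rw [pvGroupKeys_of_sorted]
  rfl
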